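-- pv_equiv track=rewrite | github.com/lypnol/adventofcode-2019 | day-17/part-2/francisco.py | compress_backtrack
-- ===== SOURCE A (Python) =====
-- def compress_backtrack(l):
--     l = tuple(l)
--     dictionary = {}
--     compressed = []
--
--     def rec(i):
--         if i == len(l):
--             return True
--
--         for j in range(i + 2, min(i + 20, len(l) + 1), 2):
--             if l[i:j] in dictionary:
--                 compressed.append(dictionary[l[i:j]])
--                 if rec(j):
--                     return True
--                 compressed.pop()
--
--             if len(dictionary) < 3 and l[i:j] not in dictionary:
--                 dictionary[l[i:j]] = len(dictionary)
--                 compressed.append(dictionary[l[i:j]])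
--                 if rec(j):
--                     return True
--                 compressed.pop()
--                 del dictionary[l[i:j]]
--
--         return False
--
--     rec(0)
--
--     return sorted(dictionary, key=lambda k: dictionary[k]), compressed
-- ===== SOURCE B (Python) =====
-- def compress_backtrack(l):
--     t = tuple(l)
--     n = len(t)
--
--     def solve(i, entries, comp):
--         # returns (entries, comp) tuples on success, None on failure; no mutation
--         if i == n:
--             return entries, comp
--         for j in range(i + 2, min(i + 20, n + 1), 2):
--             chunk = t[i:j]
--             if chunk in entries:
--                 r = solve(j, entries, comp + (entries.index(chunk),))
--                 if r is not None:
--                     return r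
--             elif len(entries) < 3:
--                 r = solve(j, entries + (chunk,), comp + (len(entries),))
--                 if r is not None:
--                     return r
--         return None
--
--     r = solve(0, (), ())
--     if r is None:
--         return [], []
--     return list(r[0]), list(r[1])
-- ===== Notes on version B (the rewrite author's own statement) =====
-- stated objective: simpler
-- what changed: A's backtracker mutates a shared dictionary and compressed list and undoes every append/insert with pop/del on failure; B is a pure recursive search that threads an immutable entry list and sequence and simply returns the found pair (or None), so no undo bookkeeping and no final sort-by-value are needed.
import Mathlib
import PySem

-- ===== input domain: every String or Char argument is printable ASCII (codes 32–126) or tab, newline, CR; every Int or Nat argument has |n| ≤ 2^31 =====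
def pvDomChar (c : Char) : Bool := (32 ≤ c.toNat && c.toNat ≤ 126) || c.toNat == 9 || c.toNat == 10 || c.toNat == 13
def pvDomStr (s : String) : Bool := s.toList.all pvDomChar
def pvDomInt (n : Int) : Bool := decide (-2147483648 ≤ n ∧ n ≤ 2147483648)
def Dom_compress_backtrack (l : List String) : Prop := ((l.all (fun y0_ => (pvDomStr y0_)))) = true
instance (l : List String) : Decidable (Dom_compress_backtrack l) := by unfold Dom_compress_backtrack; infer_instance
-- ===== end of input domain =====

-- B replaces A's mutation-and-undo backtracker (shared dict + compressed list, append/pop/del on failure)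
-- by a pure recursive search that threads the entry list and returns the solution as a value (objective: simpler).

-- ===== PORT A =====
-- A's rec mutates `dictionary` and `compressed`; the port threads them as state and returns
-- (found, dictionary, compressed), mirroring every append/pop/insert/del of the Python.
-- `fuel` (called with l.length + 1) only guards termination: the recursion advances i by ≥ 2
-- per level, so the fuel is never exhausted on the actual call.
def pvLoopA (t : List String)
    (rec : Int → PySem.Dict (List String) Int → List Int →
      Bool × PySem.Dict (List String) Int × List Int) (js : List Int) (i : Int)
    (d : PySem.Dict (List String) Int) (c : List Int) :
    Bool × PySem.Dict (List String) Int × List Int :=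
  match js with
  | [] => (false, d, c)
  | j :: js =>
    let chunk := PySem.List.slice t (some i) (some j)
    -- `if l[i:j] in dictionary:` branch (dictionary[l[i:j]] ported as getD under the guard)
    let st1 :=
      if d.contains chunk then
        let r := rec j d (c ++ [d.getD chunk 0])
        if r.1 then r else (false, r.2.1, r.2.2.dropLast)   -- compressed.pop()
      else (false, d, c)
    -- `if len(dictionary) < 3 and l[i:j] not in dictionary:` branch
    let st2 :=
      if st1.1 then st1
      else if st1.2.1.size < 3 && !(st1.2.1.contains chunk) then
        let d3 := st1.2.1.insert chunk ((st1.2.1.size : Int))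
        let r := rec j d3 (st1.2.2 ++ [d3.getD chunk 0])
        if r.1 then r else (false, r.2.1.erase chunk, r.2.2.dropLast)   -- pop(); del dictionary[…]
      else st1
    if st2.1 then st2 else pvLoopA t rec js i st2.2.1 st2.2.2

def pvRecA (t : List String) (fuel : Nat) (i : Int) (d : PySem.Dict (List String) Int)
    (c : List Int) : Bool × PySem.Dict (List String) Int × List Int :=
  match fuel with
  | 0 => (false, d, c)
  | fuel + 1 =>
    if i = PySem.List.len t then (true, d, c)
    else pvLoopA t (pvRecA t fuel)
      (PySem.List.pyRange (i + 2) (min (i + 20) (PySem.List.len t + 1)) 2) i d c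

def compress_backtrack (l : List String) : List (List String) × List Int :=
  let r := pvRecA l (l.length + 1) 0 PySem.Dict.empty []
  (PySem.List.sorted r.2.1.keys (fun k => r.2.1.getD k 0) false, r.2.2)

-- ===== PORT B =====
-- B's pure backtracker: entries (dictionary keys in insertion order) and the compressed
-- sequence are immutable; success returns the pair, failure returns none — no undo needed.
def pvLoopB (t : List String)
    (solve : Int → List (List String) → List Int → Option (List (List String) × List Int))
    (js : List Int) (i : Int)
    (es : List (List String)) (c : List Int) : Option (List (List String) × List Int) :=
  match js with
  | [] => none
  | j :: js =>
    let chunk := PySem.List.slice t (some i) (some j)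
    match PySem.List.index? es chunk with
    | some k =>
      match solve j es (c ++ [(k : Int)]) with
      | some r => some r
      | none => pvLoopB t solve js i es c
    | none =>
      if es.length < 3 then
        match solve j (es ++ [chunk]) (c ++ [(es.length : Int)]) with
        | some r => some r
        | none => pvLoopB t solve js i es c
      else pvLoopB t solve js i es c

def pvSolveB (t : List String) (fuel : Nat) (i : Int) (es : List (List String))
    (c : List Int) : Option (List (List String) × List Int) :=
  match fuel with
  | 0 => none
  | fuel + 1 =>
    if i = PySem.List.len t then some (es, c)
    else pvLoopB t (pvSolveB t fuel)
      (PySem.List.pyRange (i + 2) (min (i + 20) (PySem.List.len t + 1)) 2) i es c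

def compress_backtrack_alt (l : List String) : List (List String) × List Int :=
  match pvSolveB l (l.length + 1) 0 [] [] with
  | some r => r
  | none => ([], [])

-- ===== PRECONDITION & SPEC =====
def Spec_compress_backtrack (l : List String) (out : List (List String) × List Int) : Prop := out = compress_backtrack_alt l
instance (l : List String) (out : List (List String) × List Int) : Decidable (Spec_compress_backtrack l out) := by unfold Spec_compress_backtrack; infer_instance

-- ===== CLAIM (what is proved, stated in full; the proofs are below) =====
def Claim_equal_compress_backtrack : Prop := ∀ (l : List String), Dom_compress_backtrack l → Spec_compress_backtrack l (compress_backtrack l)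

-- ===== LEMMAS AND PROOFS =====

-- The dictionary A maintains is exactly B's entry list with its positions as values.
def pvDOf (es : List (List String)) : PySem.Dict (List String) Int :=
  ⟨es.zipIdx.map (fun p => (p.1, (p.2 : Int)))⟩

theorem pvFind_dOf (es : List (List String)) (n : Nat) (cnk : List String) :
    List.find? (fun p => p.1 == cnk) ((es.zipIdx n).map (fun p => (p.1, (p.2 : Int)))) =
      (PySem.List.index? es cnk).map (fun k => (cnk, ((k + n : Nat) : Int))) := by
  induction es generalizing n with
  | nil => simp [PySem.List.index?]
  | cons x es ih =>
    rw [PySem.List.index?_eq_idxOf?, List.idxOf?_cons]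
    by_cases hx : x = cnk
    · subst hx
      simp [List.zipIdx_cons]
    · have hbe : (x == cnk) = false := by simp [hx]
      simp only [List.zipIdx_cons, List.map_cons, List.find?_cons, hbe, Bool.false_eq_true,
        if_false, ih (n + 1), PySem.List.index?_eq_idxOf?, Option.map_map]
      cases List.idxOf? cnk es with
      | none => rfl
      | some k =>
        simp only [Option.map_some, Function.comp_apply, Option.some.injEq, Prod.mk.injEq,
          true_and]
        omega

theorem pvGet?_dOf (es : List (List String)) (cnk : List String) :
    (pvDOf es).get? cnk = (PySem.List.index? es cnk).map (fun k => (k : Int)) := by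
  simp only [PySem.Dict.get?, pvDOf, pvFind_dOf es 0 cnk, Option.map_map]
  cases PySem.List.index? es cnk <;> simp

theorem pvContains_dOf (es : List (List String)) (cnk : List String) :
    (pvDOf es).contains cnk = (PySem.List.index? es cnk).isSome := by
  rw [PySem.Dict.contains_eq_isSome_get?, pvGet?_dOf]
  cases PySem.List.index? es cnk <;> simp

theorem pvSize_dOf (es : List (List String)) : (pvDOf es).size = es.length := by
  simp [pvDOf, PySem.Dict.size]

theorem pvGetD_dOf_some (es : List (List String)) (cnk : List String) (k : Nat)
    (h : PySem.List.index? es cnk = some k) : (pvDOf es).getD cnk 0 = (k : Int) := by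
  rw [PySem.List.index?_eq_idxOf?] at h
  simp [PySem.Dict.getD, pvGet?_dOf, h]

theorem pvDOf_append (es : List (List String)) (cnk : List String) :
    pvDOf (es ++ [cnk]) =
      ⟨(es.zipIdx.map (fun p => (p.1, (p.2 : Int)))) ++ [(cnk, (es.length : Int))]⟩ := by
  simp [pvDOf, List.zipIdx_append]

theorem pvInsert_dOf (es : List (List String)) (cnk : List String)
    (h : PySem.List.index? es cnk = none) :
    (pvDOf es).insert cnk ((pvDOf es).size : Int) = pvDOf (es ++ [cnk]) := by
  have hc : (pvDOf es).contains cnk = false := by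
    rw [pvContains_dOf, h]; rfl
  rw [pvSize_dOf, pvDOf_append]
  simp only [PySem.Dict.insert, hc, Bool.false_eq_true, if_false]
  rfl

theorem pvErase_dOf (es : List (List String)) (cnk : List String) (h : cnk ∉ es) :
    (pvDOf (es ++ [cnk])).erase cnk = pvDOf es := by
  rw [pvDOf_append]
  simp only [PySem.Dict.erase, pvDOf]
  congr 1
  rw [List.filter_append]
  have h1 : (es.zipIdx.map (fun p => (p.1, (p.2 : Int)))).filter (fun p => !p.1 == cnk) =
      es.zipIdx.map (fun p => (p.1, (p.2 : Int))) := by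
    apply List.filter_eq_self.mpr
    intro p hp
    rcases List.mem_map.mp hp with ⟨q, hq, rfl⟩
    have hmemq : q.1 ∈ es := List.fst_mem_of_mem_zipIdx hq
    have hne : q.1 ≠ cnk := fun hEq => h (hEq ▸ hmemq)
    simp [hne]
  rw [h1]
  simp

theorem pvSorted_dOf (es : List (List String)) (h : es.Nodup) :
    PySem.List.sorted (pvDOf es).keys (fun k => (pvDOf es).getD k 0) false = es := by
  have hkeys : (pvDOf es).keys = es := by
    simp [pvDOf, PySem.Dict.keys, List.map_map]
    exact List.zipIdx_map_fst 0 es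
  rw [hkeys]
  apply PySem.List.sorted_eq_of_perm_of_pairwise_lt es es _ (List.Perm.refl es)
  rw [List.pairwise_iff_getElem]
  intro a b ha hb hab
  have key : ∀ (m : Nat) (hm : m < es.length), (pvDOf es).getD es[m] 0 = (m : Int) := by
    intro m hm
    apply pvGetD_dOf_some
    rw [PySem.List.index?_eq_idxOf?]
    rw [List.idxOf?_eq_some_iff]
    exact ⟨hm, rfl, fun j hj hEq => by
      have := (List.Nodup.getElem_inj_iff h).mp hEq
      omega⟩
  rw [key a ha, key b hb]
  exact_mod_cast hab

theorem pvB_nodup : ∀ (fuel : Nat) (t : List String) (i : Int) (es : List (List String))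
    (c : List Int) (r : List (List String) × List Int), es.Nodup →
    pvSolveB t fuel i es c = some r → r.1.Nodup := by
  intro fuel
  induction fuel with
  | zero => intro t i es c r _ h; simp [pvSolveB] at h
  | succ fuel ih =>
    have loop : ∀ (js : List Int) (t : List String) (i : Int) (es : List (List String))
        (c : List Int) (r : List (List String) × List Int), es.Nodup →
        pvLoopB t (pvSolveB t fuel) js i es c = some r → r.1.Nodup := by
      intro js
      induction js with
      | nil => intro t i es c r _ h; simp [pvLoopB] at h
      | cons j js ihj =>
        intro t i es c r hnd h
        simp only [pvLoopB] at h
        split at h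
        · rename_i k hidx
          split at h
          · rename_i r2 hs
            cases h
            exact ih t j es (c ++ [(k : Int)]) _ hnd hs
          · exact ihj t i es c r hnd h
        · rename_i hidx
          have hmem : PySem.List.slice t (some i) (some j) ∉ es :=
            (PySem.List.index?_eq_none_iff _ _).mp hidx
          have hnd' : (es ++ [PySem.List.slice t (some i) (some j)]).Nodup := by
            rw [List.nodup_append]
            refine ⟨hnd, List.nodup_singleton _, ?_⟩
            intro a ha b hb
            simp only [List.mem_singleton] at hb
            subst hb
            exact fun hEq => hmem (hEq ▸ ha)
          split at h
          · split at h
            · rename_i r2 hs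
              cases h
              exact ih _ _ _ _ _ hnd' hs
            · exact ihj t i es c r hnd h
          · exact ihj t i es c r hnd h
    intro t i es c r hnd h
    simp only [pvSolveB] at h
    by_cases hi : i = PySem.List.len t
    · rw [if_pos hi] at h
      cases h
      exact hnd
    · rw [if_neg hi] at h
      exact loop _ t i es c r hnd h

theorem pvMain : ∀ (fuel : Nat) (t : List String) (i : Int) (es : List (List String))
    (c : List Int), es.Nodup →
    pvRecA t fuel i (pvDOf es) c =
      (match pvSolveB t fuel i es c with
       | some r => (true, pvDOf r.1, r.2)
       | none => (false, pvDOf es, c)) := by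
  intro fuel
  induction fuel with
  | zero => intro t i es c _; simp [pvRecA, pvSolveB]
  | succ fuel ih =>
    have loop : ∀ (js : List Int) (t : List String) (i : Int) (es : List (List String))
        (c : List Int), es.Nodup →
        pvLoopA t (pvRecA t fuel) js i (pvDOf es) c =
          (match pvLoopB t (pvSolveB t fuel) js i es c with
           | some r => (true, pvDOf r.1, r.2)
           | none => (false, pvDOf es, c)) := by
      intro js
      induction js with
      | nil => intro t i es c _; simp [pvLoopA, pvLoopB]
      | cons j js ihj =>
        intro t i es c hnd
        simp only [pvLoopA, pvLoopB]
        cases hidx : PySem.List.index? es (PySem.List.slice t (some i) (some j)) with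
        | some k =>
          have hcont : (pvDOf es).contains (PySem.List.slice t (some i) (some j)) = true := by
            rw [pvContains_dOf, hidx]; rfl
          have hgetD : (pvDOf es).getD (PySem.List.slice t (some i) (some j)) 0 = (k : Int) :=
            pvGetD_dOf_some _ _ _ hidx
          simp only [hcont, if_true, hgetD]
          rw [ih t j es (c ++ [(k : Int)]) hnd]
          cases hs : pvSolveB t fuel j es (c ++ [(k : Int)]) with
          | some r => simp
          | none =>
            simp only [hcont, Bool.not_true, Bool.and_false, Bool.false_eq_true, if_false, List.dropLast_concat]
            exact ihj t i es c hnd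
        | none =>
          have hcont : (pvDOf es).contains (PySem.List.slice t (some i) (some j)) = false := by
            rw [pvContains_dOf, hidx]; rfl
          have hmem : PySem.List.slice t (some i) (some j) ∉ es :=
            (PySem.List.index?_eq_none_iff _ _).mp hidx
          simp only [hcont, Bool.false_eq_true, if_false, Bool.not_false, Bool.and_true,
            pvSize_dOf]
          by_cases hlen : es.length < 3
          · have hlen' : (decide (es.length < 3) && true) = true := by simp [hlen]
            simp only [hlen, decide_true, if_pos]
            have hins : (pvDOf es).insert (PySem.List.slice t (some i) (some j))
                ((es.length : Int)) = pvDOf (es ++ [PySem.List.slice t (some i) (some j)]) := by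
              have := pvInsert_dOf es (PySem.List.slice t (some i) (some j)) hidx
              rwa [pvSize_dOf] at this
            have hidx' : PySem.List.index? (es ++ [PySem.List.slice t (some i) (some j)])
                (PySem.List.slice t (some i) (some j)) = some es.length :=
              PySem.List.index?_append_singleton_self es _ hmem
            have hgetD' : (pvDOf (es ++ [PySem.List.slice t (some i) (some j)])).getD
                (PySem.List.slice t (some i) (some j)) 0 = (es.length : Int) :=
              pvGetD_dOf_some _ _ _ hidx'
            have hnd' : (es ++ [PySem.List.slice t (some i) (some j)]).Nodup := by
              rw [List.nodup_append]
              refine ⟨hnd, List.nodup_singleton _, ?_⟩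
              intro a ha b hb
              simp only [List.mem_singleton] at hb
              subst hb
              exact fun hEq => hmem (hEq ▸ ha)
            rw [hins, hgetD']
            rw [ih t j (es ++ [PySem.List.slice t (some i) (some j)]) (c ++ [(es.length : Int)]) hnd']
            cases hs : pvSolveB t fuel j (es ++ [PySem.List.slice t (some i) (some j)])
                (c ++ [(es.length : Int)]) with
            | some r => simp
            | none =>
              simp only [List.dropLast_concat,
                pvErase_dOf es (PySem.List.slice t (some i) (some j)) hmem]
              exact ihj t i es c hnd
          · simp only [hlen, decide_false, Bool.false_eq_true, if_false]
            exact ihj t i es c hnd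
    intro t i es c hnd
    simp only [pvRecA, pvSolveB]
    by_cases hi : i = PySem.List.len t
    · simp [hi]
    · simp only [hi, if_false]
      exact loop _ t i es c hnd

-- ===== VERDICT (by name: the statement is the Claim_ definition above) =====
theorem compress_backtrack_spec : Claim_equal_compress_backtrack := by
  intro l _
  unfold Spec_compress_backtrack compress_backtrack compress_backtrack_alt
  have hempty : (PySem.Dict.empty : PySem.Dict (List String) Int) = pvDOf [] := rfl
  rw [hempty, pvMain (l.length + 1) l 0 [] [] List.nodup_nil]
  cases hs : pvSolveB l (l.length + 1) 0 [] [] with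
  | some r =>
    have hnd : r.1.Nodup := pvB_nodup (l.length + 1) l 0 [] [] r List.nodup_nil hs
    simp [pvSorted_dOf r.1 hnd]
  | none => simp [pvDOf, PySem.List.sorted]
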